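-- pv_equiv track=rewrite | github.com/Autodesk/hubble | updater/reports/Report.py | readTSVData
-- ===== SOURCE A (Python) =====
-- def readTSVData(tsvReader):
-- 	header = None
-- 	data = []
-- 	for row in tsvReader:
-- 		if header == None:
-- 			header = row
-- 			continue
-- 		data.append(row)
-- 	return (header, data)
-- ===== SOURCE B (Python) =====
-- def readTSVData(tsvReader):
-- 	rows = list(tsvReader)
-- 	return (rows[0] if rows else None, rows[1:])
-- ===== Notes on version B (the rewrite author's own statement) =====
-- stated objective: simpler
-- what changed: Replaces the flag-guarded accumulation loop with materialize-then-slice: collect all rows once and split them as rows[0]/rows[1:].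
import Mathlib
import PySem

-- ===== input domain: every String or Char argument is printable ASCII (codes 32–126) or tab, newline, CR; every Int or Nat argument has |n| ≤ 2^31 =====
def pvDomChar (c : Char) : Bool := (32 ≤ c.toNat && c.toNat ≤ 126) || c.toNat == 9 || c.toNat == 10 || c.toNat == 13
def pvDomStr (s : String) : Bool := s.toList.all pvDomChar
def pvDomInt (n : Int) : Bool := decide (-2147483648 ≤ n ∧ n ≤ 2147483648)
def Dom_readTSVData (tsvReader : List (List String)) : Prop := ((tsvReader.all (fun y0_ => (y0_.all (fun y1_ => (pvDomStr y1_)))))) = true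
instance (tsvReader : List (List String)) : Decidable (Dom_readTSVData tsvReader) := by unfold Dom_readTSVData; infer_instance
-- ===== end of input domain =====

-- B replaces A's flag-guarded accumulation loop with a build-then-split (head/tail) decomposition; objective: simpler.

-- ===== PORT A =====
-- literal port of A's loop: state (header, data), per-row branch on header == None
def readTSVData (tsvReader : List (List String)) : Option (List String) × List (List String) :=
  let st := tsvReader.foldl
    (fun (st : Option (List String) × List (List String)) row =>
      match st.1 with
      | none => (some row, st.2)
      | some _ => (st.1, st.2 ++ [row]))
    (none, [])
  (st.1, st.2)

-- ===== PORT B =====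
-- Source B: rows[0] if rows else None, and rows[1:] (slice)
def readTSVData_alt (tsvReader : List (List String)) : Option (List String) × List (List String) :=
  let rows := tsvReader
  ((if rows.isEmpty then none else PySem.List.pyGet? rows 0),
   PySem.List.slice rows (some 1) none)

-- ===== PRECONDITION & SPEC =====
def Spec_readTSVData (tsvReader : List (List String)) (out : Option (List String) × List (List String)) : Prop := out = readTSVData_alt tsvReader
instance (tsvReader : List (List String)) (out : Option (List String) × List (List String)) : Decidable (Spec_readTSVData tsvReader out) := by unfold Spec_readTSVData; infer_instance

-- ===== CLAIM (what is proved, stated in full; the proofs are below) =====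
def Claim_equal_readTSVData : Prop := ∀ (tsvReader : List (List String)), Dom_readTSVData tsvReader → Spec_readTSVData tsvReader (readTSVData tsvReader)

-- ===== LEMMAS AND PROOFS =====

-- once the header is set to h, the fold only appends the remaining rows to data
theorem readTSVData_fold_some (rows : List (List String)) (h : List String) (acc : List (List String)) :
    rows.foldl
      (fun (st : Option (List String) × List (List String)) row =>
        match st.1 with
        | none => (some row, st.2)
        | some _ => (st.1, st.2 ++ [row]))
      (some h, acc) = (some h, acc ++ rows) := by
  induction rows generalizing acc with
  | nil => simp
  | cons r rs ih => simp [List.foldl, ih, List.append_assoc]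

-- ===== VERDICT (by name: the statement is the Claim_ definition above) =====
theorem readTSVData_spec : Claim_equal_readTSVData := by
  intro tsvReader _
  unfold Spec_readTSVData readTSVData readTSVData_alt
  cases tsvReader with
  | nil => simp [PySem.List.slice]
  | cons h t =>
    simp [List.foldl, readTSVData_fold_some, PySem.List.pyGet?, PySem.List.pyIdx?,
      PySem.List.slice]
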